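-- pv_equiv track=rewrite | github.com/jatkinson1000/AoC-2023 | AoC_2023/day15.py | sort_lenses
-- ===== SOURCE A (Python) =====
-- def hash_line(l):
--     """
--     Perform hash operation on a single string.
--     """
--     val = 0
--     for ch in l:
--         val += ord(ch)
--         val *= 17
--         val = val % 256
--
--     return val
--
-- def sort_lenses(s):
--     """
--     Sort lenses into boxes as described by the problem. Use ordered dicts!
--     """
--     boxes = [{} for _ in range(256)]
--
--     for l in s:
--         lens_n = l.replace("-", "=").split("=")[0]
--         lens_id = l.replace("-", "=").split("=")[1]
--         if "=" in l:
--             # Using dict, so no need to worry if lens is already in box or not.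
--             boxes[hash_line(lens_n)][lens_n] = lens_id
--
--         elif "-" in l and lens_n in boxes[hash_line(lens_n)]:
--             boxes[hash_line(lens_n)].pop(lens_n)
--
--     return boxes
-- ===== SOURCE B (Python) =====
-- def sort_lenses(s):
--     """
--     Same result, different organisation: the instruction loop maintains ONE
--     global ordered dict label->focal (no boxes, no hashing there); a second
--     pass then hashes each surviving lens once and partitions them into the
--     256 boxes, preserving global insertion order.  Correct because box h's
--     insertion order in A is exactly the global insertion order restricted to
--     labels hashing to h (A only ever touches box hash(label) for a label).
--     """
--     lenses = {}
--     for l in s: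
--         fields = l.replace("-", "=").split("=")
--         label, focal = fields[0], fields[1]
--         if "=" in l:
--             lenses[label] = focal
--         else:
--             lenses.pop(label, None)
--     boxes = [[] for _ in range(256)]
--     for label, focal in lenses.items():
--         h = 0
--         for ch in label:
--             h = (h + ord(ch)) * 17 % 256
--         boxes[h].append((label, focal))
--     return [dict(box) for box in boxes]
-- ===== Notes on version B (the rewrite author's own statement) =====
-- stated objective: alternative
-- what changed: The instruction loop maintains a single global ordered dict of label->focal with no boxes and no hashing at all (A keeps 256 hash-indexed boxes and recomputes the hash and the replace/split parse repeatedly per instruction); the 256 boxes only appear in a separate final pass that hashes each surviving lens once and partitions the global dict by hash.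
import Mathlib
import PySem

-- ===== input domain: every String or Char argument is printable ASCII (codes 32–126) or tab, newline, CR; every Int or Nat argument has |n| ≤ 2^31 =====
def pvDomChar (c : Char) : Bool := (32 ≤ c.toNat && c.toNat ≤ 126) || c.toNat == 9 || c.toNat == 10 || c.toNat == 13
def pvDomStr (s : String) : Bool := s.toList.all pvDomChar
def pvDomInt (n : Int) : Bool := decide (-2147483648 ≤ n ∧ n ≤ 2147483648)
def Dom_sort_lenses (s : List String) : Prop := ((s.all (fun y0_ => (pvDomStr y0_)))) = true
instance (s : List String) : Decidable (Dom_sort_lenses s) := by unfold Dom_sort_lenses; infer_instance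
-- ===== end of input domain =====

-- B maintains ONE global ordered dict label->focal during the instruction loop (no boxes,
-- no hashing there) and partitions it into the 256 boxes by hash in a separate final pass
-- (objective: alternative).

-- ===== PORT A =====
def hash_line (l : String) : Int :=
  l.toList.foldl (fun val ch => PySem.Int.mod ((val + (ch.toNat : Int)) * 17) 256) 0

-- one iteration of A's `for l in s` loop
def sortStepA (boxes : List (PySem.Dict String String)) (l : String) :
    List (PySem.Dict String String) :=
  match PySem.Str.split? (PySem.Str.replace l "-" "=") "=" with
  | some (lens_n :: lens_id :: _) =>
      if PySem.Str.isIn "=" l then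
        -- hash_line lens_n ∈ [0, 256) and boxes has length 256, so Python's
        -- boxes[hash_line(lens_n)] never raises; .toNat is exact here
        boxes.set (hash_line lens_n).toNat
          ((boxes.getD (hash_line lens_n).toNat PySem.Dict.empty).insert lens_n lens_id)
      else if PySem.Str.isIn "-" l &&
          (boxes.getD (hash_line lens_n).toNat PySem.Dict.empty).contains lens_n then
        -- `.pop(lens_n)` with lens_n known present, popped value discarded = Dict.erase
        boxes.set (hash_line lens_n).toNat
          ((boxes.getD (hash_line lens_n).toNat PySem.Dict.empty).erase lens_n)
      else boxes
  | _ => boxes  -- split gave a single piece: Python raises IndexError on [1]; excluded by Pre_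

def sort_lenses (s : List String) : List (List (String × String)) :=
  -- boxes = [{} for _ in range(256)]; the final .map items is the dict→assoc-list convention
  ((s.foldl sortStepA (List.replicate 256 PySem.Dict.empty)).map PySem.Dict.items)

-- ===== PORT B =====
-- B's inner `for ch in label` hash loop
def pyHash (label : String) : Int :=
  label.toList.foldl (fun h ch => PySem.Int.mod ((h + (ch.toNat : Int)) * 17) 256) 0

-- one iteration of B's instruction loop: one global dict, no hashing
def lensStep (lenses : PySem.Dict String String) (l : String) : PySem.Dict String String :=
  match PySem.Str.split? (PySem.Str.replace l "-" "=") "=" with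
  | some (label :: focal :: _) =>
      if PySem.Str.isIn "=" l then lenses.insert label focal
      else lenses.erase label  -- lenses.pop(label, None): remove if present, value discarded
  | _ => lenses  -- fields[1] raises IndexError in Python; excluded by Pre_

-- one iteration of B's partition loop: boxes[h].append((label, focal))
def distStep (boxes : List (List (String × String))) (p : String × String) :
    List (List (String × String)) :=
  boxes.set (pyHash p.1).toNat (boxes.getD (pyHash p.1).toNat [] ++ [p])

def sort_lenses_alt (s : List String) : List (List (String × String)) :=
  let lenses := s.foldl lensStep PySem.Dict.empty
  let boxes := lenses.items.foldl distStep (List.replicate 256 [])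
  -- return [dict(box) for box in boxes]
  boxes.map (fun box => (PySem.Dict.ofList box).items)

-- ===== PRECONDITION & SPEC =====
-- Pre_ excludes exactly the instruction strings containing neither '-' nor '=',
-- on which A raises IndexError at `split("=")[1]`.
def Pre_sort_lenses (s : List String) : Prop :=
  ∀ l ∈ s, PySem.Str.isIn "-" l = true ∨ PySem.Str.isIn "=" l = true
instance (s : List String) : Decidable (Pre_sort_lenses s) := by
  unfold Pre_sort_lenses; infer_instance

def pvWitness_sort_lenses : List String := ["rn=1", "cm-", "qp=3", "cm=2", "qp-"]

def Spec_sort_lenses (s : List String) (out : List (List (String × String))) : Prop :=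
  out = sort_lenses_alt s
instance (s : List String) (out : List (List (String × String))) :
    Decidable (Spec_sort_lenses s out) := by unfold Spec_sort_lenses; infer_instance

-- ===== CLAIM (what is proved, stated in full; the proofs are below) =====
def Claim_equal_sort_lenses : Prop :=
  ∀ (s : List String), Dom_sort_lenses s → Pre_sort_lenses s →
    Spec_sort_lenses s (sort_lenses s)

-- ===== LEMMAS AND PROOFS =====

-- the bucket predicate: does pair p land in box i?
def inBox (i : Nat) (p : String × String) : Bool := (pyHash p.1).toNat == i

theorem pyHash_nonneg_lt (l : String) : 0 ≤ pyHash l ∧ pyHash l < 256 := by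
  unfold pyHash
  induction l.toList using List.reverseRecOn with
  | nil => simp
  | append_singleton xs x _ =>
      rw [List.foldl_append, List.foldl_cons, List.foldl_nil]
      exact ⟨PySem.Int.mod_nonneg _ (by norm_num), PySem.Int.mod_lt _ (by norm_num)⟩

theorem pyHash_eq (l : String) : pyHash l = hash_line l := rfl

theorem pyHashN_lt (l : String) : (pyHash l).toNat < 256 := by
  have h := pyHash_nonneg_lt l
  omega

-- getD after set
theorem getD_set {α : Type} (bs : List α) (h i : Nat) (x d : α) (hh : h < bs.length) :
    (bs.set h x).getD i d = if i = h then x else bs.getD i d := by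
  by_cases hi : i = h
  · simp [hi, List.getD, List.getElem?_set_self (show h < bs.length by omega)]
  · simp [List.getD, List.getElem?_set_ne (show h ≠ i from fun he => hi he.symm), hi]

-- the invariant tying A's 256 boxes to B's one global dict
def BoxInv (bs : List (PySem.Dict String String)) (g : PySem.Dict String String) : Prop :=
  bs.length = 256 ∧ g.keys.Nodup ∧
    ∀ i : Nat, i < 256 →
      (bs.getD i PySem.Dict.empty).items = g.items.filter (inBox i)

theorem nodup_keys_erase (d : PySem.Dict String String) (k : String)
    (hnd : d.keys.Nodup) : (d.erase k).keys.Nodup := by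
  have hs : (d.items.filter (fun p => !(p.1 == k))).Sublist d.items := List.filter_sublist
  exact (hs.map Prod.fst).nodup hnd

-- membership of a key transfers between a box and the global dict
theorem contains_box_eq (bs : List (PySem.Dict String String)) (g : PySem.Dict String String)
    (hInv : BoxInv bs g) (k : String) :
    (bs.getD (pyHash k).toNat PySem.Dict.empty).contains k = g.contains k := by
  obtain ⟨-, -, hfi⟩ := hInv
  have hbox := hfi (pyHash k).toNat (pyHashN_lt k)
  -- contains is `items.any (·.1 == k)`
  show ((bs.getD (pyHash k).toNat PySem.Dict.empty).items.any (fun p => p.1 == k)) =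
    (g.items.any (fun p => p.1 == k))
  rw [hbox]
  rcases hg : g.items.any (fun p => p.1 == k) with _ | _
  · rw [List.any_eq_false] at hg ⊢
    intro p hp
    exact hg p (List.mem_of_mem_filter hp)
  · rw [List.any_eq_true] at hg ⊢
    obtain ⟨p, hp, hpk⟩ := hg
    refine ⟨p, List.mem_filter.mpr ⟨hp, ?_⟩, hpk⟩
    have : p.1 = k := by simpa using hpk
    simp [inBox, this]

-- filter by bucket commutes with dict-style insert on the item list, same-bucket case
theorem filter_insert_same (gs : List (String × String)) (k v : String)
    (i : Nat) (hk : inBox i (k, v) = true) :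
    ((if gs.any (fun p => p.1 == k) then gs.map (fun p => if p.1 == k then (k, v) else p)
      else gs ++ [(k, v)]).filter (inBox i)) =
    (if gs.any (fun p => p.1 == k) then
       (gs.filter (inBox i)).map (fun p => if p.1 == k then (k, v) else p)
     else gs.filter (inBox i) ++ [(k, v)]) := by
  have hpres : ∀ p : String × String, inBox i (if p.1 == k then (k, v) else p) = inBox i p := by
    intro p
    by_cases hp : p.1 = k
    · simp [inBox, hp]
    · simp [hp]
  rcases hg : gs.any (fun p => p.1 == k) with _ | _
  · simp [List.filter_append, hk]
  · simp only [if_true]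
    rw [List.filter_map]
    simp only [Function.comp_def]
    rw [List.filter_congr (fun p _ => hpres p)]

-- filter by bucket kills an insert aimed at another bucket
theorem filter_insert_other (gs : List (String × String)) (k v : String)
    (i : Nat) (hk : inBox i (k, v) = false) :
    ((if gs.any (fun p => p.1 == k) then gs.map (fun p => if p.1 == k then (k, v) else p)
      else gs ++ [(k, v)]).filter (inBox i)) = gs.filter (inBox i) := by
  have hkey : ∀ p ∈ gs.filter (inBox i), ¬ p.1 = k := by
    intro p hp hpk
    have h1 := (List.mem_filter.mp hp).2
    simp only [inBox] at h1 hk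
    rw [hpk] at h1
    simp [h1] at hk
  rcases hg : gs.any (fun p => p.1 == k) with _ | _
  · simp [List.filter_append, hk]
  · simp only [if_true]
    rw [List.filter_map]
    simp only [Function.comp_def]
    have hflt : gs.filter (fun p => inBox i (if p.1 == k then (k, v) else p)) =
        gs.filter (inBox i) := by
      apply List.filter_congr
      intro p _
      by_cases hp : p.1 = k
      · simp [inBox, hp]
      · simp [hp]
    rw [hflt]
    -- the overwrite map is the identity: no element of the filtered list has key k
    have hid : (gs.filter (inBox i)).map (fun p => if p.1 == k then (k, v) else p) =
        (gs.filter (inBox i)).map id :=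
      List.map_congr_left (fun p hp => by simp [hkey p hp])
    simpa using hid

-- erasing an absent key leaves the item list unchanged
theorem filter_of_not_contains (d : PySem.Dict String String) (k : String)
    (hc : ¬ d.contains k = true) :
    d.items.filter (fun p => !(p.1 == k)) = d.items := by
  apply List.filter_eq_self.mpr
  intro p hp
  have : ¬ (p.1 == k) = true := fun hpk => hc (List.any_eq_true.mpr ⟨p, hp, hpk⟩)
  simpa using this

-- one instruction preserves the invariant
theorem step_inv (bs : List (PySem.Dict String String)) (g : PySem.Dict String String)
    (l : String) (hInv : BoxInv bs g)
    (hl : PySem.Str.isIn "-" l = true ∨ PySem.Str.isIn "=" l = true) :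
    BoxInv (sortStepA bs l) (lensStep g l) := by
  obtain ⟨hlen, hnd, hfi⟩ := hInv
  unfold sortStepA lensStep
  cases hsp : PySem.Str.split? (PySem.Str.replace l "-" "=") "=" with
  | none => exact ⟨hlen, hnd, hfi⟩
  | some parts =>
    match parts with
    | [] => exact ⟨hlen, hnd, hfi⟩
    | [x] => exact ⟨hlen, hnd, hfi⟩
    | label :: focal :: rest =>
      have hhlt : (hash_line label).toNat < 256 := pyHashN_lt label
      have hca : ∀ d : PySem.Dict String String, ∀ k,
          d.contains k = d.items.any (fun p => p.1 == k) := fun _ _ => rfl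
      have hcbox : (bs.getD (hash_line label).toNat PySem.Dict.empty).contains label =
          g.contains label := contains_box_eq bs g ⟨hlen, hnd, hfi⟩ label
      by_cases heq : PySem.Str.isIn "=" l = true
      · -- '=' : insert into box h ↔ insert into the global dict
        simp only [heq, if_true]
        refine ⟨by rw [List.length_set]; exact hlen, PySem.Dict.nodup_keys_insert _ _ _ hnd, ?_⟩
        intro i hi
        rw [getD_set _ _ _ _ _ (by rw [hlen]; exact hhlt)]
        by_cases hih : i = (hash_line label).toNat
        · subst hih
          rw [if_pos rfl, PySem.Dict.items_insert, PySem.Dict.items_insert, hcbox, hca g label,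
            filter_insert_same g.items label focal _ (by simp only [inBox, pyHash_eq]; simp), hfi _ hhlt]
        · rw [if_neg hih, PySem.Dict.items_insert, hca g label,
            filter_insert_other g.items label focal i
              (by simp only [inBox, pyHash_eq]; simpa using fun he => hih he.symm),
            hfi i hi]
      · -- '-' : erase from box h ↔ erase from the global dict
        have hminus : PySem.Str.isIn "-" l = true := by
          rcases hl with h1 | h1
          · exact h1
          · exact absurd h1 heq
        have heqf : PySem.Str.isIn "=" l = false := by simpa using heq
        simp only [heqf, Bool.false_eq_true, if_false, hminus, Bool.true_and]
        by_cases hc : (bs.getD (hash_line label).toNat PySem.Dict.empty).contains label = true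
        · simp only [hc, if_true]
          refine ⟨by rw [List.length_set]; exact hlen, nodup_keys_erase g label hnd, ?_⟩
          intro i hi
          rw [getD_set _ _ _ _ _ (by rw [hlen]; exact hhlt)]
          have herase : ∀ d : PySem.Dict String String,
              (d.erase label).items = d.items.filter (fun p => !(p.1 == label)) :=
            fun _ => rfl
          by_cases hih : i = (hash_line label).toNat
          · subst hih
            rw [if_pos rfl, herase, herase, List.filter_comm, hfi _ hhlt]
          · rw [if_neg hih, herase, List.filter_comm, hfi i hi]
            refine (List.filter_eq_self.mpr ?_).symm
            intro p hp
            have h1 := (List.mem_filter.mp hp).2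
            simp only [inBox] at h1
            have : ¬ p.1 = label := by
              intro he
              rw [he] at h1
              rw [pyHash_eq] at h1
              exact hih (by simpa using h1 : (hash_line label).toNat = i).symm
            simpa using this
        · simp only [Bool.not_eq_true] at hc
          simp only [hc, Bool.false_eq_true, if_false]
          have hgc : ¬ g.contains label = true := by rw [← hcbox, hc]; simp
          have herase : (g.erase label).items = g.items :=
            filter_of_not_contains g label hgc
          refine ⟨hlen, nodup_keys_erase g label hnd, ?_⟩
          intro i hi
          rw [show (g.erase label).items = g.items from herase]
          exact hfi i hi

theorem fold_inv (s : List String) (bs : List (PySem.Dict String String))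
    (g : PySem.Dict String String) (hInv : BoxInv bs g)
    (hl : ∀ l ∈ s, PySem.Str.isIn "-" l = true ∨ PySem.Str.isIn "=" l = true) :
    BoxInv (s.foldl sortStepA bs) (s.foldl lensStep g) := by
  induction s generalizing bs g with
  | nil => exact hInv
  | cons l ls ih =>
      exact ih _ _ (step_inv bs g l hInv (hl l (by simp)))
        (fun x hx => hl x (by simp [hx]))

-- B's partition loop builds exactly the bucket filters
theorem dist_fold (gs : List (String × String)) (bs : List (List (String × String)))
    (hlen : bs.length = 256) :
    (gs.foldl distStep bs).length = 256 ∧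
      ∀ i : Nat, i < 256 →
        (gs.foldl distStep bs).getD i [] = bs.getD i [] ++ gs.filter (inBox i) := by
  induction gs generalizing bs with
  | nil => exact ⟨hlen, fun i _ => by simp⟩
  | cons p gs ih =>
      have hh : (pyHash p.1).toNat < bs.length := by rw [hlen]; exact pyHashN_lt p.1
      obtain ⟨l1, l2⟩ := ih (distStep bs p) (by rw [distStep, List.length_set]; exact hlen)
      refine ⟨l1, fun i hi => ?_⟩
      rw [List.foldl_cons, l2 i hi, distStep, getD_set _ _ _ _ _ hh]
      by_cases hih : i = (pyHash p.1).toNat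
      · subst hih
        have hb : inBox (pyHash p.1).toNat p = true := by simp [inBox]
        simp [hb]
      · have hb : inBox i p = false := by
          simp only [inBox]
          simpa using fun he => hih he.symm
        simp [hb, hih]

-- dict(box) over a nodup-keyed pair list gives back exactly that list
theorem items_ofList_self (box : List (String × String))
    (hnd : (box.map Prod.fst).Nodup) : (PySem.Dict.ofList box).items = box := by
  have := PySem.Dict.items_foldl_insert_fresh box Prod.fst Prod.snd
    (PySem.Dict.empty (κ := String) (ν := String))
    (by intro a _; rfl) hnd
  have hmap : box.map (fun a => (a.1, a.2)) = box := by simp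
  simpa [PySem.Dict.ofList, PySem.Dict.update, PySem.Dict.empty, hmap] using this

-- ===== VERDICT (by name: the statement is the Claim_ definition above) =====
theorem sort_lenses_spec : Claim_equal_sort_lenses := by
  intro s _ _
  unfold Spec_sort_lenses sort_lenses sort_lenses_alt
  have hInv0 : BoxInv (List.replicate 256 PySem.Dict.empty) PySem.Dict.empty := by
    refine ⟨List.length_replicate, by simp [PySem.Dict.keys, PySem.Dict.empty], ?_⟩
    intro i hi
    rw [List.getD_eq_getElem _ _ (by rw [List.length_replicate]; exact hi),
      List.getElem_replicate]
    rfl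
  obtain ⟨hlen, hnd, hfi⟩ := fold_inv s _ _ hInv0 (by assumption)
  set g := s.foldl lensStep PySem.Dict.empty with hg
  obtain ⟨hlenB, hfiB⟩ := dist_fold g.items (List.replicate 256 []) List.length_replicate
  apply List.ext_getElem
  · rw [List.length_map, hlen, List.length_map, hlenB]
  · intro i h1 h2
    rw [List.getElem_map, List.getElem_map]
    have hi : i < 256 := by rw [List.length_map, hlen] at h1; exact h1
    have hA : ((s.foldl sortStepA (List.replicate 256 PySem.Dict.empty))[i]'(by
        rw [hlen]; exact hi)).items = g.items.filter (inBox i) := by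
      rw [← List.getD_eq_getElem _ PySem.Dict.empty (by rw [hlen]; exact hi)]
      exact hfi i hi
    have hB : (g.items.foldl distStep (List.replicate 256 []))[i]'(by
        rw [hlenB]; exact hi) = g.items.filter (inBox i) := by
      rw [← List.getD_eq_getElem _ ([] : List (String × String)) (by rw [hlenB]; exact hi),
        hfiB i hi, List.getD_eq_getElem _ _ (by rw [List.length_replicate]; exact hi),
        List.getElem_replicate, List.nil_append]
    rw [hA, hB, items_ofList_self]
    exact ((List.filter_sublist).map Prod.fst).nodup hnd
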